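-- pv_equiv track=rewrite | github.com/TerazKubi/P-C-max-greedy | main.py | pc_max_greedy
-- ===== SOURCE A (Python) =====
-- def pc_max_greedy(proc_num, job_tim):
--     d = {}
--     #przygotowanie procesorow / slownika / dictionary
--     for x in range(0, proc_num):
--         d.update({str(x): []})
--
--     #dodawanie procesow do pierwszych wolnych procesorow
--     for job_time in job_tim:
--         index = get_index_of_min_sum_list(d)
--         d[str(index)].append(job_time)
--
--     return d
--
-- def get_index_of_min_sum_list(di):
--     sums = []
--     for i in range(0, len(di)):
--         s = sum(di[str(i)])
--         if s == 0:
--             return i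
--         else:
--             sums.append(s)
--
--     return sums.index(min(sums))
-- ===== SOURCE B (Python) =====
-- def pc_max_greedy(proc_num, job_tim):
--     """Greedy P||Cmax: each job goes to a free (zero-load) processor if one
--     exists, otherwise to the least-loaded one.  Running loads are maintained
--     alongside the buckets, so no bucket is ever re-summed."""
--     buckets = [[] for _ in range(proc_num)]
--     loads = [0] * len(buckets)
--     for t in job_tim:
--         if 0 in loads:
--             i = loads.index(0)
--         else:
--             i = min(range(len(loads)), key=lambda k: loads[k])
--         buckets[i].append(t)
--         loads[i] += t
--     return {str(i): b for i, b in enumerate(buckets)}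
-- ===== Notes on version B (the rewrite author's own statement) =====
-- stated objective: faster
-- what changed: B maintains a running load per processor and picks the target (first free processor, else least-loaded) directly from that array, instead of A's string-keyed dict whose every bucket is re-summed for every job; Pre_ only excludes proc_num <= 0 with a nonempty job list, where A raises ValueError.
import Mathlib
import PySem

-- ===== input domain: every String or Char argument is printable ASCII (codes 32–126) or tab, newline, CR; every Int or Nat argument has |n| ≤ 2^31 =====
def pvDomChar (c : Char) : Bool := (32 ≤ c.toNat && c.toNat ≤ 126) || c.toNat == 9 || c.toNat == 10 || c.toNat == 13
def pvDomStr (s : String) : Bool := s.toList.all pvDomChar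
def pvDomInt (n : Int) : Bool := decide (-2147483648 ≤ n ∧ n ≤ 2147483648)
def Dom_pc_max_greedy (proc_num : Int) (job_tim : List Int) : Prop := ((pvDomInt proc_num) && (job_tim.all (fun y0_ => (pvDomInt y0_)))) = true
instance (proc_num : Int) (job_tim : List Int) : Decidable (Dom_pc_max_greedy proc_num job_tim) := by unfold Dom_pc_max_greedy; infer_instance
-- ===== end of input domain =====

-- B maintains running per-processor loads and picks the target (first free processor, else the
-- least-loaded) from that array, instead of A's per-job re-summation of every bucket of a
-- string-keyed dict; return values proved equal on Pre_.

-- ===== PORT A =====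
-- the scan inside get_index_of_min_sum_list, carrying the accumulated `sums`
def get_index_of_min_sum_list_go (di : PySem.Dict String (List Int)) : List Int → List Int → Int
  | [], sums =>
      -- `return sums.index(min(sums))`; on empty `sums` Python raises ValueError (excluded by Pre_), the `.getD 0` is unreachable there
      (((PySem.List.min? sums (fun x => x)).bind (fun m => PySem.List.index? sums m)).map (fun k => (k : Int))).getD 0
  | i :: rest, sums =>
      -- `s = sum(di[str(i)])`; for every admitted call the key is present, so the `[]` default is never used
      let s := (PySem.Dict.getD di (PySem.Int.toStr i) []).sum
      if s = 0 then i else get_index_of_min_sum_list_go di rest (sums ++ [s])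

def get_index_of_min_sum_list (di : PySem.Dict String (List Int)) : Int :=
  get_index_of_min_sum_list_go di (PySem.List.pyRange 0 (PySem.Dict.size di) 1) []

-- body of A's `for job_time in job_tim` loop
def pcAStep (d : PySem.Dict String (List Int)) (job_time : Int) : PySem.Dict String (List Int) :=
  let index := get_index_of_min_sum_list d
  -- `d[str(index)].append(job_time)`
  PySem.Dict.modify d (PySem.Int.toStr index) [] (fun l => l ++ [job_time])

def pc_max_greedy (proc_num : Int) (job_tim : List Int) : List (String × List Int) :=
  let d : PySem.Dict String (List Int) :=
    (PySem.List.pyRange 0 proc_num 1).foldl (fun d x => d.insert (PySem.Int.toStr x) []) (PySem.Dict.mk [])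
  (job_tim.foldl pcAStep d).items

-- ===== PORT B =====
-- body of B's `for t in job_tim` loop, over the state (buckets, loads)
def pcAltStep (st : List (List Int) × List Int) (t : Int) : List (List Int) × List Int :=
  -- `i = loads.index(0) if 0 in loads else min(range(len(loads)), key=lambda k: loads[k])`;
  -- both `.getD 0` defaults are unreachable (`index?` is guarded, `min` on an empty range is excluded by Pre_)
  let i : Int :=
    if (0 : Int) ∈ st.2 then (((PySem.List.index? st.2 0).getD 0 : Nat) : Int)
    else (PySem.List.min? (PySem.List.pyRange 0 (PySem.List.len st.2) 1)
            (fun k => PySem.List.pyGetD st.2 k 0)).getD 0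
  (PySem.List.pySetD st.1 i (PySem.List.pyGetD st.1 i [] ++ [t]),
   PySem.List.pySetD st.2 i (PySem.List.pyGetD st.2 i 0 + t))

def pc_max_greedy_alt (proc_num : Int) (job_tim : List Int) : List (String × List Int) :=
  let buckets : List (List Int) := (PySem.List.pyRange 0 proc_num 1).map (fun _ => ([] : List Int))
  let st := job_tim.foldl pcAltStep (buckets, List.replicate buckets.length 0)
  (PySem.List.enumerate st.1 0).map (fun p => (PySem.Int.toStr p.1, p.2))

-- ===== PRECONDITION & SPEC =====
-- Pre_ excludes proc_num ≤ 0 together with a nonempty job list: there A calls min() on an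
-- empty list and raises ValueError (B raises the same ValueError on the same inputs).
def Pre_pc_max_greedy (proc_num : Int) (job_tim : List Int) : Prop := job_tim = [] ∨ 1 ≤ proc_num
instance (proc_num : Int) (job_tim : List Int) : Decidable (Pre_pc_max_greedy proc_num job_tim) := by
  unfold Pre_pc_max_greedy; infer_instance
def pvWitness_pc_max_greedy : Int × List Int := (2, [3, 1, 2])

def Spec_pc_max_greedy (proc_num : Int) (job_tim : List Int) (out : List (String × List Int)) : Prop := out = pc_max_greedy_alt proc_num job_tim
instance (proc_num : Int) (job_tim : List Int) (out : List (String × List Int)) : Decidable (Spec_pc_max_greedy proc_num job_tim out) := by unfold Spec_pc_max_greedy; infer_instance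

-- ===== CLAIM (what is proved, stated in full; the proofs are below) =====
def Claim_equal_pc_max_greedy : Prop := ∀ (proc_num : Int) (job_tim : List Int), Dom_pc_max_greedy proc_num job_tim → Pre_pc_max_greedy proc_num job_tim → Spec_pc_max_greedy proc_num job_tim (pc_max_greedy proc_num job_tim)

-- ===== LEMMAS AND PROOFS =====

-- str(n) is injective on the nonnegative integers (the only keys either port forms)
theorem pvDigitChar_inj {a b : Nat} (ha : a < 10) (hb : b < 10) (h : Nat.digitChar a = Nat.digitChar b) : a = b := by
  interval_cases a <;> interval_cases b <;> simp_all [Nat.digitChar]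

theorem pvToDigits_inj (m n : Nat) (h : Nat.toDigits 10 m = Nat.toDigits 10 n) : m = n := by
  induction m using Nat.strong_induction_on generalizing n with
  | _ m ih =>
    rw [Nat.toDigits_eq_if (b:=10) (n:=m) (by norm_num), Nat.toDigits_eq_if (b:=10) (n:=n) (by norm_num)] at h
    by_cases hm : m < 10 <;> by_cases hn : n < 10
    · simp only [if_pos hm, if_pos hn] at h
      exact pvDigitChar_inj hm hn (List.singleton_injective h)
    · simp only [if_pos hm, if_neg hn] at h
      have hlen := congrArg List.length h
      have hl : 0 < (Nat.toDigits 10 (n / 10)).length := Nat.length_toDigits_pos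
      simp only [List.length_append, List.length_cons, List.length_nil] at hlen; omega
    · simp only [if_neg hm, if_pos hn] at h
      have hlen := congrArg List.length h
      have hl : 0 < (Nat.toDigits 10 (m / 10)).length := Nat.length_toDigits_pos
      simp only [List.length_append, List.length_cons, List.length_nil] at hlen; omega
    · simp only [if_neg hm, if_neg hn] at h
      have h2 := List.append_inj h (by
        have hlen := congrArg List.length h
        have hl : 0 < (Nat.toDigits 10 (m / 10)).length := Nat.length_toDigits_pos
        simp only [List.length_append, List.length_cons, List.length_nil] at hlen; omega)
      obtain ⟨h3, h4⟩ := h2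
      have hdiv : m / 10 = n / 10 := ih (m/10) (by omega) (n/10) h3
      have hmod : m % 10 = n % 10 :=
        pvDigitChar_inj (by omega) (by omega) (List.singleton_injective h4)
      omega

theorem pvToStr_inj {a b : Int} (ha : 0 ≤ a) (hb : 0 ≤ b) (h : PySem.Int.toStr a = PySem.Int.toStr b) : a = b := by
  have h2 := congrArg String.toList h
  rw [PySem.Int.toList_toStr, PySem.Int.toList_toStr] at h2
  simp only [PySem.Int.toChars, if_neg (by omega : ¬ a < 0), if_neg (by omega : ¬ b < 0)] at h2
  have := pvToDigits_inj _ _ h2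
  omega

theorem pvToStrNat_inj : Function.Injective (fun k : Nat => PySem.Int.toStr (k : Int)) := by
  intro a b h
  exact_mod_cast pvToStr_inj (by positivity) (by positivity) h

-- the key order "zero-load first, then smaller load" under which both ports' selections are the
-- first minimum (a proof device only; neither port computes with it)
def pcKeyLt (a b : Int) : Bool :=
  (a == 0 && b != 0) || ((a == 0) == (b == 0) && decide (a < b))


theorem pcKeyLt_iff (a b : Int) : pcKeyLt a b = true ↔ ((a = 0 ∧ b ≠ 0) ∨ ((a = 0 ↔ b = 0) ∧ a < b)) := by
  by_cases ha : a = 0 <;> by_cases hb : b = 0 <;> simp [pcKeyLt, ha, hb]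


theorem pcKeyLt_zero_right (a : Int) : pcKeyLt a 0 = false := by
  by_cases ha : a = 0 <;> simp [pcKeyLt, ha]

theorem pcKeyLt_zero_left {b : Int} (hb : b ≠ 0) : pcKeyLt 0 b = true := by
  simp [pcKeyLt, hb]

theorem pcKeyLt_ne_iff {a b : Int} (ha : a ≠ 0) (hb : b ≠ 0) : pcKeyLt a b = true ↔ a < b := by
  rw [pcKeyLt_iff]; omega

-- "i is the index A/B select": first index of the key-minimal load among the first n
def pcFM (ls : List Int) (n i : Nat) : Prop :=
  i < n ∧ (∀ j, j < n → pcKeyLt (ls.getD j 0) (ls.getD i 0) = false)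
        ∧ (∀ j, j < i → pcKeyLt (ls.getD i 0) (ls.getD j 0) = true)

theorem pcFM_unique {ls : List Int} {n i i' : Nat} (h : pcFM ls n i) (h' : pcFM ls n i') : i = i' := by
  rcases h with ⟨hi, hmin, hfst⟩
  rcases h' with ⟨hi', hmin', hfst'⟩
  rcases Nat.lt_trichotomy i i' with hlt | heq | hgt
  · have := hfst' i hlt
    have := hmin i' hi'
    simp_all
  · exact heq
  · have := hfst i' hgt
    have := hmin' i hi
    simp_all

-- B's `min(range(len(loads)), key=…)` call: first plain argmin of the loads
theorem pcMin_spec (ls : List Int) (h : 1 ≤ ls.length) :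
    ∃ i : Nat, PySem.List.min? (PySem.List.pyRange 0 (PySem.List.len ls) 1)
        (fun k => PySem.List.pyGetD ls k 0) = some ((i : Nat) : Int)
      ∧ i < ls.length
      ∧ (∀ j, j < ls.length → ¬ ls.getD j 0 < ls.getD i 0)
      ∧ (∀ j, j < i → ls.getD i 0 < ls.getD j 0) := by
  have aux : ∀ n, 1 ≤ n → n ≤ ls.length → ∃ i : Nat,
      PySem.List.min? (PySem.List.pyRange 0 (n : Int) 1) (fun k => PySem.List.pyGetD ls k 0) = some ((i : Nat) : Int)
      ∧ i < n ∧ (∀ j, j < n → ¬ ls.getD j 0 < ls.getD i 0) ∧ (∀ j, j < i → ls.getD i 0 < ls.getD j 0) := by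
    intro n hn
    induction n, hn using Nat.le_induction with
    | base =>
      intro _
      refine ⟨0, ?_, Nat.one_pos, ?_, ?_⟩
      · have h1 : PySem.List.pyRange 0 ((1 : Nat) : Int) 1 = [(0 : Int)] := by
          push_cast
          exact PySem.List.pyRange_one_singleton 0
        rw [h1]; rfl
      · intro j hj
        have : j = 0 := by omega
        subst this; omega
      · intro j hj; omega
    | succ n hn ih =>
      intro hle
      obtain ⟨i, hfold, hilt, hmin, hfst⟩ := ih (by omega)
      have hsplit : PySem.List.pyRange 0 ((n + 1 : Nat) : Int) 1
          = PySem.List.pyRange 0 (n : Int) 1 ++ [(n : Int)] := by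
        push_cast
        exact PySem.List.pyRange_one_succ_right (by omega)
      unfold PySem.List.min? at hfold ⊢
      rw [hsplit, List.foldl_append, hfold]
      simp only [List.foldl_cons, List.foldl_nil, PySem.List.pyGetD_natCast]
      by_cases hc : ls.getD n 0 < ls.getD i 0
      · rw [if_pos hc]
        refine ⟨n, rfl, by omega, ?_, ?_⟩
        · intro j hj
          rcases Nat.lt_or_ge j n with hjn | hjn
          · have := hmin j hjn; omega
          · have : j = n := by omega
            subst this; omega
        · intro j hj
          have := hmin j hj; omega
      · rw [if_neg hc]
        refine ⟨i, rfl, by omega, ?_, hfst⟩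
        intro j hj
        rcases Nat.lt_or_ge j n with hjn | hjn
        · exact hmin j hjn
        · have : j = n := by omega
          subst this; exact hc
  rw [show PySem.List.len ls = ((ls.length : Nat) : Int) by simp [PySem.List.len_eq]]
  exact aux ls.length h le_rfl

-- B's selection (`loads.index(0)` when a load is zero, else the plain argmin) finds the pcFM index
theorem pcSelB_spec (ls : List Int) (h : 1 ≤ ls.length) :
    ∃ i : Nat, (if (0 : Int) ∈ ls then (((PySem.List.index? ls 0).getD 0 : Nat) : Int)
        else (PySem.List.min? (PySem.List.pyRange 0 (PySem.List.len ls) 1)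
                (fun k => PySem.List.pyGetD ls k 0)).getD 0) = (i : Int)
      ∧ pcFM ls ls.length i := by
  by_cases hz : (0 : Int) ∈ ls
  · rw [if_pos hz]
    cases hidx : PySem.List.index? ls 0 with
    | none => rw [PySem.List.index?_eq_none_iff] at hidx; exact absurd hz hidx
    | some j =>
      obtain ⟨hjlt, hjm, hjfst⟩ := PySem.List.getElem_of_index?_eq_some hidx
      refine ⟨j, by simp, hjlt, ?_, ?_⟩
      · intro k hk
        rw [List.getD_eq_getElem ls 0 hjlt, hjm]
        exact pcKeyLt_zero_right _
      · intro k hk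
        rw [List.getD_eq_getElem ls 0 hjlt, hjm, List.getD_eq_getElem ls 0 (by omega)]
        exact pcKeyLt_zero_left (hjfst k hk)
  · rw [if_neg hz]
    obtain ⟨i, hmin?, hilt, hmin, hfst⟩ := pcMin_spec ls h
    have hne : ∀ j, j < ls.length → ls.getD j 0 ≠ 0 := by
      intro j hj hc
      apply hz
      rw [List.getD_eq_getElem ls 0 hj] at hc
      rw [← hc]
      exact List.getElem_mem _
    refine ⟨i, by rw [hmin?]; rfl, hilt, ?_, ?_⟩
    · intro j hj
      cases hc : pcKeyLt (ls.getD j 0) (ls.getD i 0) with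
      | true =>
        rw [pcKeyLt_ne_iff (hne j hj) (hne i hilt)] at hc
        exact absurd hc (hmin j hj)
      | false => rfl
    · intro j hj
      rw [pcKeyLt_ne_iff (hne i hilt) (hne j (by omega))]
      exact hfst j hj

-- lookup in the dict both ports logically share
def pcAssoc (bs : List (List Int)) : List (String × List Int) :=
  (PySem.List.enumerate bs 0).map (fun p => (PySem.Int.toStr p.1, p.2))

def pcDict (bs : List (List Int)) : PySem.Dict String (List Int) := PySem.Dict.mk (pcAssoc bs)

theorem pcAssoc_eq (bs : List (List Int)) :
    pcAssoc bs = (List.range bs.length).map (fun (j : Nat) => (PySem.Int.toStr (j : Int), bs.getD j [])) := by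
  unfold pcAssoc
  rw [PySem.List.enumerate_eq_map_pyRange bs []]
  rw [show PySem.List.len bs = ((bs.length : Nat) : Int) by simp [PySem.List.len_eq]]
  rw [PySem.List.pyRange_zero_natCast]
  simp [List.map_map, Function.comp_def, PySem.List.pyGetD_natCast]

theorem pcDict_keys (bs : List (List Int)) :
    (pcDict bs).keys = (List.range bs.length).map (fun k : Nat => PySem.Int.toStr (k : Int)) := by
  simp only [PySem.Dict.keys, pcDict, pcAssoc_eq, List.map_map, Function.comp_def]

theorem pcDict_keys_nodup (bs : List (List Int)) : (pcDict bs).keys.Nodup := by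
  rw [pcDict_keys]
  exact (List.nodup_range).map pvToStrNat_inj

theorem pcDict_getD {bs : List (List Int)} {j : Nat} (hj : j < bs.length) :
    (pcDict bs).getD (PySem.Int.toStr (j : Int)) [] = bs.getD j [] := by
  have hmem : (PySem.Int.toStr (j : Int), bs.getD j []) ∈ (pcDict bs).items := by
    show _ ∈ pcAssoc bs
    rw [pcAssoc_eq]
    exact List.mem_map_of_mem (by simpa using hj)
  exact PySem.Dict.getD_of_mem_items _ hmem (pcDict_keys_nodup bs) []

-- A's helper finds the same pcFM index
theorem pcSelA_spec (bs : List (List Int)) (h : 1 ≤ bs.length) :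
    ∃ i : Nat, get_index_of_min_sum_list (pcDict bs) = (i : Int) ∧ pcFM (bs.map List.sum) bs.length i := by
  set ls := bs.map List.sum with hls
  have hlen : ls.length = bs.length := by simp [hls]
  have hget : ∀ j, j < bs.length → ls.getD j 0 = (bs.getD j []).sum := by
    intro j hj
    rw [List.getD_eq_getElem ls 0 (by omega), List.getD_eq_getElem bs [] hj]
    simp [hls]
  have aux : ∀ fuel k, k + fuel = bs.length → (∀ j, j < k → ls.getD j 0 ≠ 0) →
      ∃ i : Nat, get_index_of_min_sum_list_go (pcDict bs) (PySem.List.pyRange (k : Int) (bs.length : Int) 1) (ls.take k) = (i : Int)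
        ∧ pcFM ls bs.length i := by
    intro fuel
    induction fuel with
    | zero =>
      intro k hk hnz
      have hkk : k = bs.length := by omega
      subst hkk
      have hr : PySem.List.pyRange (bs.length : Int) (bs.length : Int) 1 = [] := by
        apply List.eq_nil_of_length_eq_zero
        rw [PySem.List.length_pyRange_one]; omega
      rw [hr, List.take_of_length_le (by omega)]
      show ∃ i : Nat, ((((PySem.List.min? ls (fun x => x)).bind (fun m => PySem.List.index? ls m)).map
        (fun k => (k : Int))).getD 0 = (i : Int)) ∧ _
      cases hmin : PySem.List.min? ls (fun x => x) with
      | none =>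
        rw [PySem.List.min?_eq_none_iff] at hmin
        rw [hmin] at hlen; simp at hlen; omega
      | some m =>
        have hmem : m ∈ ls := PySem.List.min?_mem hmin
        have hmle : ∀ y ∈ ls, m ≤ y := PySem.List.min?_isMin hmin
        cases hidx : PySem.List.index? ls m with
        | none => rw [PySem.List.index?_eq_none_iff] at hidx; exact absurd hmem hidx
        | some j =>
          obtain ⟨hjlt, hjm, hjfst⟩ := PySem.List.getElem_of_index?_eq_some hidx
          have hmne : m ≠ 0 := by
            obtain ⟨jj, hjj, rfl⟩ := List.mem_iff_getElem.mp hmem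
            have := hnz jj (by omega)
            rwa [List.getD_eq_getElem ls 0 (by omega)] at this
          have hidx' : List.idxOf? m ls = some j := by
            rw [← PySem.List.index?_eq_idxOf?]; exact hidx
          refine ⟨j, by simp [hidx'], by omega, ?_, ?_⟩
          · intro jj hjj
            have hne : ls.getD jj 0 ≠ 0 := hnz jj (by omega)
            rw [List.getD_eq_getElem ls 0 (by omega), List.getD_eq_getElem ls 0 (by omega), hjm]
            rw [List.getD_eq_getElem ls 0 (by omega)] at hne
            have hle := hmle ls[jj] (List.getElem_mem _)
            cases hc : pcKeyLt ls[jj] m with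
            | true => rw [pcKeyLt_ne_iff hne hmne] at hc; omega
            | false => rfl
          · intro jj hjj
            rw [List.getD_eq_getElem ls 0 (by omega), List.getD_eq_getElem ls 0 (by omega), hjm]
            have hne : ls.getD jj 0 ≠ 0 := hnz jj (by omega)
            rw [List.getD_eq_getElem ls 0 (by omega)] at hne
            have hle := hmle ls[jj] (List.getElem_mem _)
            rw [pcKeyLt_ne_iff hmne hne]
            have := hjfst jj hjj
            omega
    | succ fuel ih =>
      intro k hk hnz
      have hklt : k < bs.length := by omega
      rw [PySem.List.pyRange_one_cons (by exact_mod_cast hklt)]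
      show ∃ i : Nat, ((if ((pcDict bs).getD (PySem.Int.toStr (k : Int)) []).sum = 0 then (k : Int)
        else get_index_of_min_sum_list_go (pcDict bs) (PySem.List.pyRange ((k : Int) + 1) (bs.length : Int) 1)
          (ls.take k ++ [((pcDict bs).getD (PySem.Int.toStr (k : Int)) []).sum])) = (i : Int)) ∧ _
      rw [pcDict_getD hklt, ← hget k hklt]
      by_cases hz : ls.getD k 0 = 0
      · rw [if_pos hz]
        refine ⟨k, rfl, by omega, ?_, ?_⟩
        · intro j hj
          rw [hz]; exact pcKeyLt_zero_right _
        · intro j hj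
          rw [hz]; exact pcKeyLt_zero_left (hnz j hj)
      · rw [if_neg hz]
        have htake : ls.take k ++ [ls.getD k 0] = ls.take (k + 1) := by
          rw [List.take_add_one, List.getD_eq_getElem ls 0 (by omega)]
          simp [List.getElem?_eq_getElem (by omega : k < ls.length)]
        have hcast : ((k : Int) + 1) = ((k + 1 : Nat) : Int) := by push_cast; ring
        rw [htake, hcast]
        exact ih (k + 1) (by omega) (fun j hj => by
          rcases Nat.lt_or_ge j k with hjk | hjk
          · exact hnz j hjk
          · have : j = k := by omega
            subst this; exact hz)
  have hsize : PySem.Dict.size (pcDict bs) = bs.length := by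
    show (pcDict bs).items.length = _
    show (pcAssoc bs).length = _
    rw [pcAssoc_eq]; simp
  unfold get_index_of_min_sum_list
  rw [hsize]
  have h0 : PySem.List.pyRange ((0 : Nat) : Int) (bs.length : Int) 1 = PySem.List.pyRange 0 (bs.length : Int) 1 := by norm_num
  have := aux bs.length 0 (by omega) (by omega)
  rw [h0] at this
  simpa using this

-- one loop step of each port, related through pcDict
theorem pcStep_eq (bs : List (List Int)) (t : Int) (h : 1 ≤ bs.length) :
    ∃ sel : Nat, sel < bs.length ∧
      pcAStep (pcDict bs) t = pcDict (bs.set sel (bs.getD sel [] ++ [t])) ∧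
      pcAltStep (bs, bs.map List.sum) t =
        (bs.set sel (bs.getD sel [] ++ [t]), (bs.set sel (bs.getD sel [] ++ [t])).map List.sum) := by
  obtain ⟨iA, hA, hFMA⟩ := pcSelA_spec bs h
  obtain ⟨iB, hB, hFMB⟩ := pcSelB_spec (bs.map List.sum) (by simpa using h)
  have hlen : (bs.map List.sum).length = bs.length := by simp
  rw [hlen] at hFMB
  have heqsel : iB = iA := pcFM_unique hFMB hFMA
  rw [heqsel] at hB
  have hsel : iA < bs.length := hFMA.1
  have hgetsum : (bs.map List.sum).getD iA 0 = (bs.getD iA []).sum := by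
    rw [List.getD_eq_getElem _ 0 (by omega), List.getD_eq_getElem bs [] hsel]
    simp
  have hinsert : (pcDict bs).insert (PySem.Int.toStr (iA : Int)) (bs.getD iA [] ++ [t])
      = pcDict (bs.set iA (bs.getD iA [] ++ [t])) := by
    apply PySem.Dict.ext
    rw [PySem.Dict.items_insert_of_contains _ _ (by
      rw [PySem.Dict.contains_iff_mem_keys, pcDict_keys]
      exact List.mem_map_of_mem (by simpa using hsel))]
    show (pcAssoc bs).map _ = pcAssoc _
    rw [pcAssoc_eq, pcAssoc_eq, List.map_map, List.length_set]
    apply List.map_congr_left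
    intro j hj
    have hjlt : j < bs.length := by simpa using hj
    simp only [Function.comp_def]
    by_cases hje : j = iA
    · subst hje
      simp only [beq_self_eq_true, if_pos]
      symm
      congr 1
      rw [List.getD_eq_getElem _ _ (by simp [hjlt]), List.getElem_set_self]
    · have hne : (PySem.Int.toStr (j : Int) == PySem.Int.toStr (iA : Int)) = false := by
        apply beq_eq_false_iff_ne.mpr
        intro hc
        exact hje (pvToStrNat_inj hc)
      rw [if_neg (by simp [hne])]
      symm
      congr 1
      rw [List.getD_eq_getElem _ _ (by simp [hjlt]), List.getElem_set_ne (by omega),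
        List.getD_eq_getElem bs [] hjlt]
  refine ⟨iA, hsel, ?_, ?_⟩
  · unfold pcAStep
    rw [hA]
    show (pcDict bs).insert _ ((pcDict bs).getD _ [] ++ [t]) = _
    rw [pcDict_getD hsel, hinsert]
  · unfold pcAltStep
    dsimp only
    rw [hB]
    simp only [PySem.List.pySetD_natCast, PySem.List.pyGetD_natCast]
    refine Prod.ext rfl ?_
    show _ = (bs.set iA (bs.getD iA [] ++ [t])).map List.sum
    rw [List.map_set]
    rw [hgetsum, List.sum_append]
    simp

theorem pcLoop_eq (jobs : List Int) (bs : List (List Int)) (h : 1 ≤ bs.length) :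
    jobs.foldl pcAStep (pcDict bs) = pcDict ((jobs.foldl pcAltStep (bs, bs.map List.sum)).1) := by
  induction jobs generalizing bs with
  | nil => rfl
  | cons t rest ih =>
    obtain ⟨sel, hsel, hA, hB⟩ := pcStep_eq bs t h
    simp only [List.foldl_cons, hA, hB]
    exact ih _ (by simpa using h)

-- the initial dict of A is pcDict of the initial buckets of B
theorem pcInit_eq (proc_num : Int) :
    ((PySem.List.pyRange 0 proc_num 1).foldl (fun d x => d.insert (PySem.Int.toStr x) []) (PySem.Dict.mk []))
      = pcDict ((PySem.List.pyRange 0 proc_num 1).map (fun _ => ([] : List Int))) := by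
  apply PySem.Dict.ext
  by_cases h : 0 ≤ proc_num
  · obtain ⟨n, rfl⟩ : ∃ n : Nat, proc_num = (n : Int) := ⟨proc_num.toNat, by omega⟩
    rw [PySem.List.pyRange_zero_natCast]
    rw [PySem.Dict.items_foldl_insert_fresh _ _ _ _ (fun a _ => by simp [PySem.Dict.contains])
      (by rw [List.map_map]; exact (List.nodup_range).map pvToStrNat_inj)]
    show _ = pcAssoc _
    rw [pcAssoc_eq]
    simp only [List.map_map, Function.comp_def, List.length_map, List.length_range, List.nil_append]
    apply List.map_congr_left
    intro j hj
    have : (List.map (fun _ => ([] : List Int)) (List.range n)).getD j [] = [] := by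
      rcases Nat.lt_or_ge j n with hlt | hge
      · rw [List.getD_eq_getElem _ _ (by simpa using hlt)]; simp
      · rw [List.getD_eq_default _ _ (by simpa using hge)]
    rw [this]
  · have hnil : PySem.List.pyRange 0 proc_num 1 = [] := by
      apply List.eq_nil_of_length_eq_zero
      rw [PySem.List.length_pyRange_one]; omega
    rw [hnil]; rfl

theorem pcInit_loads (proc_num : Int) :
    List.replicate ((PySem.List.pyRange 0 proc_num 1).map (fun _ => ([] : List Int))).length (0 : Int)
      = ((PySem.List.pyRange 0 proc_num 1).map (fun _ => ([] : List Int))).map List.sum := by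
  simp

-- ===== VERDICT (by name: the statement is the Claim_ definition above) =====
theorem pc_max_greedy_spec : Claim_equal_pc_max_greedy := by
  intro proc_num job_tim _ hpre
  unfold Spec_pc_max_greedy pc_max_greedy pc_max_greedy_alt
  dsimp only
  rw [pcInit_eq, pcInit_loads]
  rcases hpre with h | h
  · subst h; rfl
  · rw [pcLoop_eq job_tim _ (by
      simp only [List.length_map, PySem.List.length_pyRange_one]
      omega)]
    rfl
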